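-- pv_equiv track=rewrite | github.com/akhandsingh17/assignments | codingexercise/OccurencesCharTogether.py | OccurencesCharTogether
-- ===== SOURCE A (Python) =====
-- def OccurencesCharTogether(ary,c):
--
--     lst=list(ary)
--     seenFlg=False
--     for i in range(0,len(lst)):
--         key=lst[i]
--         if key==c:
--             seenFlg=True
--         else:
--             if seenFlg==True:
--                 if c not in lst[i+1:]:
--                     return True
--                 else:
--                     return False
--
--     return seenFlg
-- ===== SOURCE B (Python) =====
-- def OccurencesCharTogether(ary, c):
--     positions = [i for i, x in enumerate(ary) if x == c]
--     if not positions: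
--         return False
--     return positions[-1] - positions[0] + 1 == len(positions)
-- ===== Notes on version B (the rewrite author's own statement) =====
-- stated objective: simpler
-- what changed: Replaces the stateful early-exit scan with tail membership re-scans by one index-gathering pass plus an O(1) span-equals-count arithmetic test.
import Mathlib
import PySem

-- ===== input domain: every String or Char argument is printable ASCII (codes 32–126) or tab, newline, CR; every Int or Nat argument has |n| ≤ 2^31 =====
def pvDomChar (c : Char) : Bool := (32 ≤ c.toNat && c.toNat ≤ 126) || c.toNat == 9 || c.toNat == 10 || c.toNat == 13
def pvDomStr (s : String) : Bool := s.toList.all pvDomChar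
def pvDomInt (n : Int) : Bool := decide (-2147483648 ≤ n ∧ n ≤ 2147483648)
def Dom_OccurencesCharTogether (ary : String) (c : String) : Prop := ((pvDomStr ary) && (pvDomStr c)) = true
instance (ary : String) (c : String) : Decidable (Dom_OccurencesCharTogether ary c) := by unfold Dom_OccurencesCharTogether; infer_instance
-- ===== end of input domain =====

-- B replaces A's stateful early-exit scan (with a tail membership re-scan) by one
-- index-gathering pass plus a span-equals-count arithmetic test (objective: simpler).

-- ===== PORT A =====
-- the for-loop of A: 'seen' is seenFlg, the list argument is lst[i:], so the
-- recursive tail is exactly lst[i+1:] used by the membership test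
def pvOccLoop (c : String) : List Char → Bool → Bool
  | [], seen => seen
  | k :: rest, seen =>
    if String.mk [k] == c then pvOccLoop c rest true
    else if seen then
      (if rest.any (fun x => String.mk [x] == c) then false else true)
    else pvOccLoop c rest false

def OccurencesCharTogether (ary : String) (c : String) : Bool :=
  pvOccLoop c ary.toList false

-- ===== PORT B =====
def OccurencesCharTogether_alt (ary : String) (c : String) : Bool :=
  let positions : List Int :=
    ((PySem.List.enumerate ary.toList 0).filter (fun p => String.mk [p.2] == c)).map Prod.fst
  match positions with
  | [] => false
  | p :: ps => decide ((p :: ps).getLastD 0 - p + 1 = ((p :: ps).length : Int))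

-- ===== PRECONDITION & SPEC =====
def Spec_OccurencesCharTogether (ary : String) (c : String) (out : Bool) : Prop := out = OccurencesCharTogether_alt ary c
instance (ary : String) (c : String) (out : Bool) : Decidable (Spec_OccurencesCharTogether ary c out) := by unfold Spec_OccurencesCharTogether; infer_instance

-- ===== CLAIM (what is proved, stated in full; the proofs are below) =====
def Claim_equal_OccurencesCharTogether : Prop := ∀ (ary : String) (c : String), Dom_OccurencesCharTogether ary c → Spec_OccurencesCharTogether ary c (OccurencesCharTogether ary c)

-- ===== LEMMAS AND PROOFS =====

-- index list of B, abstracted over the comparison and the starting index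
def pvPos (f : Char → Bool) (s : Int) (l : List Char) : List Int :=
  ((PySem.List.enumerate l s).filter (fun p => f p.2)).map Prod.fst

-- B's final arithmetic test
def pvCheck : List Int → Bool
  | [] => false
  | p :: ps => decide ((p :: ps).getLastD 0 - p + 1 = ((p :: ps).length : Int))

lemma pvPos_nil (f : Char → Bool) (s : Int) : pvPos f s [] = [] := rfl

lemma pvPos_cons (f : Char → Bool) (s : Int) (a : Char) (l : List Char) :
    pvPos f s (a :: l) = if f a then s :: pvPos f (s + 1) l else pvPos f (s + 1) l := by
  simp only [pvPos, PySem.List.enumerate_cons, List.filter_cons]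
  split <;> simp_all

lemma pvPos_empty_of_not_any (f : Char → Bool) (l : List Char) (s : Int)
    (h : l.any f = false) : pvPos f s l = [] := by
  induction l generalizing s with
  | nil => rfl
  | cons a l ih =>
    simp only [List.any_cons, Bool.or_eq_false_iff] at h
    rw [pvPos_cons, if_neg (by simp [h.1]), ih _ h.2]

lemma pvPos_ne_empty_of_any (f : Char → Bool) (l : List Char) (s : Int)
    (h : l.any f = true) : pvPos f s l ≠ [] := by
  induction l generalizing s with
  | nil => simp at h
  | cons a l ih =>
    rw [pvPos_cons]
    by_cases hfa : f a = true
    · simp [hfa]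
    · simp only [List.any_cons, Bool.or_eq_true] at h
      rcases h with h | h
      · exact absurd h hfa
      · rw [if_neg (by simp [hfa])]; exact ih _ h

lemma pvPos_getLast_ge (f : Char → Bool) (l : List Char) :
    ∀ (s : Int) (p : Int) (ps : List Int), pvPos f s l = p :: ps →
      s + (ps.length : Int) ≤ (p :: ps).getLastD 0 := by
  induction l with
  | nil => intro s p ps h; simp [pvPos_nil] at h
  | cons a l ih =>
    intro s p ps h
    rw [pvPos_cons] at h
    by_cases hfa : f a = true
    · rw [if_pos hfa] at h
      cases h
      cases hps : pvPos f (s + 1) l with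
      | nil => simp
      | cons q qs =>
        have := ih (s + 1) q qs hps
        simp only [List.getLastD_cons, List.length_cons] at this ⊢
        push_cast at this ⊢
        omega
    · rw [if_neg (by simp [hfa])] at h
      have := ih (s + 1) p ps h
      omega

lemma pvOccLoop_true_eq (c : String) (l : List Char) :
    ∀ s : Int, pvOccLoop c l true =
      pvCheck (s :: pvPos (fun x => String.mk [x] == c) (s + 1) l) := by
  induction l with
  | nil =>
    intro s
    simp only [pvOccLoop, pvPos_nil, pvCheck]
    simp
  | cons a l ih =>
    intro s
    set f : Char → Bool := fun x => String.mk [x] == c with hf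
    by_cases hfa : f a = true
    · rw [pvPos_cons, if_pos hfa]
      show pvOccLoop c (a :: l) true = pvCheck (s :: (s + 1) :: pvPos f (s + 1 + 1) l)
      have hstep : pvOccLoop c (a :: l) true = pvOccLoop c l true := by
        simp only [pvOccLoop]; rw [if_pos (by simpa [hf] using hfa)]
      rw [hstep, ih (s + 1)]
      cases hps : pvPos f (s + 1 + 1) l with
      | nil => simp [pvCheck]
      | cons q qs =>
        simp only [pvCheck, List.getLastD_cons, List.length_cons]
        have : ((q :: qs).getLastD 0 - (s + 1) + 1 = ((qs.length : Int) + 1)) ↔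
            ((q :: qs).getLastD 0 - s + 1 = ((qs.length : Int) + 1 + 1)) := by omega
        simp only [List.getLastD_cons] at this ⊢
        rw [decide_eq_decide.mpr]
        push_cast
        push_cast at this
        omega
    · rw [pvPos_cons, if_neg (by simp [hfa])]
      have hstep : pvOccLoop c (a :: l) true =
          (if l.any f then false else true) := by
        simp only [pvOccLoop]; rw [if_neg (by simpa [hf] using hfa)]; rfl
      rw [hstep]
      by_cases hany : l.any f = true
      · rw [if_pos hany]
        cases hps : pvPos f (s + 1 + 1) l with
        | nil => exact absurd hps (pvPos_ne_empty_of_any f l _ hany)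
        | cons q qs =>
          have hge := pvPos_getLast_ge f l (s + 1 + 1) q qs hps
          simp only [pvCheck, List.getLastD_cons, List.length_cons]
          simp only [List.getLastD_cons] at hge
          rw [decide_eq_false]
          push_cast
          push_cast at hge
          omega
      · rw [if_neg hany, pvPos_empty_of_not_any f l _ (by simpa using hany)]
        simp [pvCheck]
lemma pvOccLoop_false_eq (c : String) (l : List Char) :
    ∀ s : Int, pvOccLoop c l false =
      pvCheck (pvPos (fun x => String.mk [x] == c) s l) := by
  induction l with
  | nil => intro s; simp [pvOccLoop, pvPos_nil, pvCheck]
  | cons a l ih =>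
    intro s
    set f : Char → Bool := fun x => String.mk [x] == c with hf
    by_cases hfa : f a = true
    · rw [pvPos_cons, if_pos hfa]
      have hstep : pvOccLoop c (a :: l) false = pvOccLoop c l true := by
        simp only [pvOccLoop]; rw [if_pos (by simpa [hf] using hfa)]
      rw [hstep, pvOccLoop_true_eq c l s]
    · rw [pvPos_cons, if_neg (by simp [hfa])]
      have hstep : pvOccLoop c (a :: l) false = pvOccLoop c l false := by
        simp only [pvOccLoop]; rw [if_neg (by simpa [hf] using hfa)]; rfl
      rw [hstep, ih (s + 1)]

-- ===== VERDICT (by name: the statement is the Claim_ definition above) =====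
theorem OccurencesCharTogether_spec : Claim_equal_OccurencesCharTogether := by
  intro ary c _
  show OccurencesCharTogether ary c = OccurencesCharTogether_alt ary c
  unfold OccurencesCharTogether OccurencesCharTogether_alt
  rw [pvOccLoop_false_eq c ary.toList 0]
  rfl
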